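-- pv_equiv track=rewrite | github.com/1r0nw1ll/quantum-arithmetic-research | experiments/arto_ternary_logic_experiment.py | equivalent_trits_for_bits
-- ===== SOURCE A (Python) =====
-- def equivalent_trits_for_bits(bits: int) -> int:
--     """Smallest ternary symbol count with at least the same state capacity."""
--     states = 2**bits
--     trits = 0
--     capacity = 1
--     while capacity < states:
--         trits += 1
--         capacity *= 3
--     return trits
-- ===== SOURCE B (Python) =====
-- def equivalent_trits_for_bits(bits: int) -> int:
--     """Smallest ternary symbol count with at least the same state capacity."""
--     if bits <= 0:
--         return 0
--     lo, hi = 0, bits  # 3**bits >= 2**bits, so the answer lies in [0, bits]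
--     while lo < hi:
--         mid = (lo + hi) // 2
--         if 3 ** mid >= 1 << bits:
--             hi = mid
--         else:
--             lo = mid + 1
--     return lo
-- ===== Notes on version B (the rewrite author's own statement) =====
-- stated objective: faster
-- what changed: Replaces the linear multiply-up loop (one bignum multiplication per trit) with a binary search on the trit count between zero and bits comparing 3**mid against 1<<bits.
import Mathlib
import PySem

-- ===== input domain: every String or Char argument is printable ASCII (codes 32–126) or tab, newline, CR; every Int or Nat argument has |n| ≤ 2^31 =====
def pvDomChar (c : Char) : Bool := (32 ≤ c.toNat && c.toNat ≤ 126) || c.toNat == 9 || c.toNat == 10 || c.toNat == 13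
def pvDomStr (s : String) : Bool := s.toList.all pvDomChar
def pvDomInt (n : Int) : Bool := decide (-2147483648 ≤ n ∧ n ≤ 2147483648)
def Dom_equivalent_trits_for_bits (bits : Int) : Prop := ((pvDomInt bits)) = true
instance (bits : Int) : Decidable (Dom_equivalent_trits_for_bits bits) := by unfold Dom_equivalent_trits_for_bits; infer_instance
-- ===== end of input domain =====

-- B changes the linear trial-multiplication loop into a binary search on the trit count; header objective: faster.

-- ===== PORT A =====
-- The while loop: 'while capacity < states: trits += 1; capacity *= 3'.
-- The extra '1 ≤ capacity' guard only makes termination provable; capacity starts at 1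
-- and is only multiplied by 3, so it holds on every reachable state.
def pvLoopA (states capacity trits : Int) : Int :=
  if h : capacity < states ∧ 1 ≤ capacity then
    pvLoopA states (capacity * 3) (trits + 1)
  else trits
termination_by (states - capacity).toNat
decreasing_by omega

def equivalent_trits_for_bits (bits : Int) : Int :=
  -- Python: states = 2**bits. For bits < 0, 2**bits is a float strictly below or equal to one, so the
  -- comparison 'capacity < states' (1 < states) is false and the loop never runs,
  -- returning trits = 0; that branch ports that float case exactly.
  if bits < 0 then 0
  else pvLoopA (2 ^ bits.toNat) 1 0

-- ===== PORT B =====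
-- Binary search: lo, hi = 0, bits; while lo < hi: mid = (lo+hi)//2; …
def pvSearchB (bits lo hi : Int) : Int :=
  if h : lo < hi then
    let mid := PySem.Int.floordiv (lo + hi) 2
    -- Python: 3 ** mid >= 1 << bits; here 0 ≤ mid and 0 < bits on every reachable
    -- state (lo starts at 0, hi at bits > 0), so the Nat exponents are exact.
    if (2:Int) ^ bits.toNat ≤ 3 ^ mid.toNat then pvSearchB bits lo mid
    else pvSearchB bits (mid + 1) hi
  else lo
termination_by (hi - lo).toNat
decreasing_by
  · have := PySem.Int.floordiv_two_mid_bounds (lo := lo) (hi := hi) (le_of_lt h)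
    have hlt : PySem.Int.floordiv (lo + hi) 2 < hi := by
      rw [PySem.Int.floordiv_eq_ediv_of_pos (by omega)]; omega
    rw [PySem.Int.floordiv_eq_ediv_of_pos (by omega)] at this ⊢
    omega
  · have := PySem.Int.floordiv_two_mid_bounds (lo := lo) (hi := hi) (le_of_lt h)
    rw [PySem.Int.floordiv_eq_ediv_of_pos (by omega)] at this ⊢
    omega

def equivalent_trits_for_bits_alt (bits : Int) : Int :=
  if bits ≤ 0 then 0
  else pvSearchB bits 0 bits

-- ===== PRECONDITION & SPEC =====
def Spec_equivalent_trits_for_bits (bits : Int) (out : Int) : Prop := out = equivalent_trits_for_bits_alt bits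
instance (bits : Int) (out : Int) : Decidable (Spec_equivalent_trits_for_bits bits out) := by unfold Spec_equivalent_trits_for_bits; infer_instance

-- ===== CLAIM (what is proved, stated in full; the proofs are below) =====
def Claim_equal_equivalent_trits_for_bits : Prop := ∀ (bits : Int), Dom_equivalent_trits_for_bits bits → Spec_equivalent_trits_for_bits bits (equivalent_trits_for_bits bits)

-- ===== LEMMAS AND PROOFS =====

-- Both programs compute the least m with 2^b ≤ 3^m; we characterise each against that.

theorem pvPow3_mono {a b : Nat} (h : a ≤ b) : (3:Int) ^ a ≤ 3 ^ b :=
  pow_le_pow_right₀ (by norm_num) h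

-- A's loop, started at capacity = 3^j, trits = j, returns the least m ≥ j with s ≤ 3^m.
theorem pvLoopA_spec (s : Int) (j : Nat) (N : Nat)
    (hNle : s ≤ 3 ^ N) (hNmin : ∀ m : Nat, m < N → ¬ s ≤ 3 ^ m) (hjN : j ≤ N) :
    pvLoopA s (3 ^ j) (j : Int) = (N : Int) := by
  by_cases hlt : (3:Int) ^ j < s
  · have hj : j ≠ N := by rintro rfl; omega
    rw [pvLoopA]
    have h1 : (1:Int) ≤ 3 ^ j := one_le_pow₀ (by norm_num)
    rw [dif_pos ⟨hlt, h1⟩]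
    have : (3:Int) ^ j * 3 = 3 ^ (j + 1) := by ring
    rw [this]
    have : ((j:Int) + 1) = ((j + 1 : Nat) : Int) := by push_cast; ring
    rw [this]
    exact pvLoopA_spec s (j + 1) N hNle hNmin (by omega)
  · -- s ≤ 3^j, so minimality forces j = N
    have : j = N := by
      by_contra hne
      exact hNmin j (by omega) (by omega)
    subst this
    rw [pvLoopA, dif_neg (by omega)]
termination_by N - j
decreasing_by omega

-- B's binary search returns N whenever N ∈ [lo, hi].
theorem pvSearchB_spec (bits lo hi : Int) (N : Nat)
    (hNle : (2:Int) ^ bits.toNat ≤ 3 ^ N)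
    (hNmin : ∀ m : Nat, m < N → ¬ (2:Int) ^ bits.toNat ≤ 3 ^ m)
    (hlo : 0 ≤ lo) (hloN : lo ≤ (N : Int)) (hNhi : (N : Int) ≤ hi) :
    pvSearchB bits lo hi = (N : Int) := by
  by_cases h : lo < hi
  · rw [pvSearchB, dif_pos h]
    have hmid := PySem.Int.floordiv_two_mid_bounds (lo := lo) (hi := hi) (le_of_lt h)
    rw [PySem.Int.floordiv_eq_ediv_of_pos (by omega)] at hmid ⊢
    set mid := (lo + hi) / 2 with hmiddef
    have hmidlt : mid < hi := by omega
    have hmid0 : 0 ≤ mid := by omega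
    show (if (2:Int) ^ bits.toNat ≤ 3 ^ mid.toNat then pvSearchB bits lo mid
          else pvSearchB bits (mid + 1) hi) = (N : Int)
    split_ifs with hq
    · have hNmid : (N : Int) ≤ mid := by
        by_contra hc
        push Not at hc
        have : mid.toNat < N := by omega
        exact hNmin mid.toNat this hq
      exact pvSearchB_spec bits lo mid N hNle hNmin hlo hloN hNmid
    · have hmidN : mid < (N : Int) := by
        by_contra hc
        push Not at hc
        have : (3:Int) ^ N ≤ 3 ^ mid.toNat := pvPow3_mono (by omega)
        exact hq (le_trans hNle this)
      exact pvSearchB_spec bits (mid + 1) hi N hNle hNmin (by omega) (by omega) hNhi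
  · rw [pvSearchB, dif_neg h]
    omega
termination_by (hi - lo).toNat
decreasing_by
  · omega
  · omega

theorem pvExistsN (b : Nat) : ∃ m : Nat, (2:Int) ^ b ≤ 3 ^ m :=
  ⟨b, pow_le_pow_left₀ (by norm_num) (by norm_num) b⟩

-- ===== VERDICT (by name: the statement is the Claim_ definition above) =====
theorem equivalent_trits_for_bits_spec : Claim_equal_equivalent_trits_for_bits := by
  intro bits _
  unfold Spec_equivalent_trits_for_bits equivalent_trits_for_bits equivalent_trits_for_bits_alt
  by_cases hneg : bits < 0
  · rw [if_pos hneg, if_pos (by omega)]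
  · rw [if_neg hneg]
    set b := bits.toNat with hb
    have hN := Nat.find_spec (pvExistsN b)
    have hNmin : ∀ m : Nat, m < Nat.find (pvExistsN b) → ¬ (2:Int) ^ b ≤ 3 ^ m :=
      fun m hm => Nat.find_min (pvExistsN b) hm
    set N := Nat.find (pvExistsN b) with hNdef
    have hA : pvLoopA (2 ^ b) 1 0 = (N : Int) := by
      have := pvLoopA_spec (2 ^ b) 0 N hN hNmin (by omega)
      simpa using this
    rw [hA]
    by_cases h0 : bits ≤ 0
    · -- bits = 0: s = 1 ≤ 3^0 so N = 0
      rw [if_pos h0]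
      have hb0 : b = 0 := by omega
      have : N = 0 := by
        by_contra hne
        exact hNmin 0 (by omega) (by rw [hb0]; norm_num)
      omega
    · rw [if_neg h0]
      have hNb : (N : Int) ≤ bits := by
        have : ¬ b < N := fun hc => hNmin b hc (pow_le_pow_left₀ (by norm_num) (by norm_num) b)
        omega
      exact (pvSearchB_spec bits 0 bits N hN hNmin le_rfl (by omega) hNb).symm
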